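-- pv_equiv track=rewrite | github.com/MatheusFranco99/CP | Vitor/CodeForces/1779A.py | Lcase
-- ===== SOURCE A (Python) =====
-- def Lcase(value):
--     # return index of swap or -1
--     if "R" not in value:
--         return -1
--     else:
--         foundR = False
--         foundRL = False
--         for char in value:
--             if char == 'R':
--                 foundR = True
--             if char == 'L' and foundR:
--                 foundRL = True
--                 break
--
--         if foundRL:
--             return 0
--         else:
--             for i, v in enumerate(value):
--                 if v == 'R':
--                     return i
-- ===== SOURCE B (Python) =====
-- def Lcase(value):
--     # return index of swap or -1
--     # single right-to-left pass: remember whether an 'L' lies to the right,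
--     # remember the leftmost 'R' seen so far, and whether some 'R' had an 'L' after it
--     sawL = False
--     fired = False
--     firstR = -1
--     for i in range(len(value) - 1, -1, -1):
--         c = value[i]
--         if c == 'L':
--             sawL = True
--         elif c == 'R':
--             firstR = i
--             if sawL:
--                 fired = True
--     if firstR == -1:
--         return -1
--     return 0 if fired else firstR
-- ===== Notes on version B (the rewrite author's own statement) =====
-- stated objective: alternative
-- what changed: Replaces A's two forward scans (flag-tracking R-then-L detection plus an enumerate fallback for the first R) by a single right-to-left pass that accumulates whether an L lies to the right, the leftmost R index, and whether any R had an L after it.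
import Mathlib
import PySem

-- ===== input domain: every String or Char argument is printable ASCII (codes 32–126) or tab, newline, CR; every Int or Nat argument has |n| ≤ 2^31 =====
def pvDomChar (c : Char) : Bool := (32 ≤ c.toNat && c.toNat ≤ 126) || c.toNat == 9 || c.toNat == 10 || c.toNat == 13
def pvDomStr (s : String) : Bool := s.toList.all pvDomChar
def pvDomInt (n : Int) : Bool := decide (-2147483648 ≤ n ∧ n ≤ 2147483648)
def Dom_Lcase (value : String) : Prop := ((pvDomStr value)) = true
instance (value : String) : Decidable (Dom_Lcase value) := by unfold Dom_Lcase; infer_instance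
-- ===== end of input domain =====

-- B replaces A's two forward scans by one right-to-left accumulator pass (leftmost R, L-to-the-right flag); same cost, different decomposition.


-- ===== PORT A =====
-- the first for-loop: foundR/foundRL flags with break (returns foundRL)
def lcaseLoop1 : List Char → Bool → Bool
  | [], _ => false
  | c :: rest, foundR =>
      let foundR' := foundR || (c == 'R')
      if c == 'L' && foundR' then true else lcaseLoop1 rest foundR'

-- the second for-loop over enumerate(value): return i at the first 'R'
-- (the [] case is unreachable in A's branch, where "R" in value; Python would fall out returning None)
def lcaseLoop2 : List Char → Nat → Int
  | [], _ => -1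
  | c :: rest, i => if c == 'R' then (i : Int) else lcaseLoop2 rest (i + 1)

def Lcase (value : String) : Int :=
  if PySem.Str.isIn "R" value = false then -1
  else
    if lcaseLoop1 value.toList false then 0
    else lcaseLoop2 value.toList 0

-- ===== PORT B =====
-- B's right-to-left loop: processing the suffix first (state (sawL, fired, firstR)),
-- then updating it with the current char at index i — exactly Source B's reversed-range loop.
def lcaseScan : List Char → Nat → (Bool × Bool × Int)
  | [], _ => (false, false, -1)
  | c :: rest, i =>
      let st := lcaseScan rest (i + 1)
      if c == 'L' then (true, st.2.1, st.2.2)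
      else if c == 'R' then (st.1, st.2.1 || st.1, (i : Int))
      else st

def Lcase_alt (value : String) : Int :=
  if (lcaseScan value.toList 0).2.2 == -1 then -1
  else if (lcaseScan value.toList 0).2.1 then 0 else (lcaseScan value.toList 0).2.2

-- ===== PRECONDITION & SPEC =====
def Spec_Lcase (value : String) (out : Int) : Prop := out = Lcase_alt value
instance (value : String) (out : Int) : Decidable (Spec_Lcase value out) := by unfold Spec_Lcase; infer_instance

-- ===== CLAIM (what is proved, stated in full; the proofs are below) =====
def Claim_equal_Lcase : Prop := ∀ (value : String), Dom_Lcase value → Spec_Lcase value (Lcase value)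

-- ===== LEMMAS AND PROOFS =====

-- a list containing 'R' splits at its first 'R'
theorem exists_firstR (l : List Char) (h : 'R' ∈ l) :
    ∃ p t, l = p ++ 'R' :: t ∧ 'R' ∉ p := by
  induction l with
  | nil => cases h
  | cons c rest ih =>
      by_cases hc : c = 'R'
      · exact ⟨[], rest, by simp [hc], by simp⟩
      · have hr : 'R' ∈ rest := by
          rcases List.mem_cons.mp h with h1 | h1
          · exact absurd h1.symm hc
          · exact h1
        obtain ⟨p, t, hpt, hnp⟩ := ih hr
        exact ⟨c :: p, t, by simp [hpt], by
          simp only [List.mem_cons, not_or]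
          exact ⟨fun h' => hc h'.symm, hnp⟩⟩

-- ----- A's loops -----
theorem lcaseLoop1_true (l : List Char) : lcaseLoop1 l true = decide ('L' ∈ l) := by
  induction l with
  | nil => simp [lcaseLoop1]
  | cons c rest ih =>
      by_cases hc : c = 'L'
      · simp [lcaseLoop1, hc]
      · simp [lcaseLoop1, hc, ih]
        exact fun h => absurd h.symm hc

theorem lcaseLoop1_skip (p rest : List Char) (hp : 'R' ∉ p) :
    lcaseLoop1 (p ++ rest) false = lcaseLoop1 rest false := by
  induction p with
  | nil => rfl
  | cons c q ih =>
      simp only [List.mem_cons, not_or] at hp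
      have hc : c ≠ 'R' := fun h => hp.1 h.symm
      have hceq : (c == 'R') = false := by simp [hc]
      simp [lcaseLoop1, hceq, ih hp.2]

theorem lcaseLoop2_skip (p rest : List Char) (i : Nat) (hp : 'R' ∉ p) :
    lcaseLoop2 (p ++ rest) i = lcaseLoop2 rest (i + p.length) := by
  induction p generalizing i with
  | nil => simp
  | cons c q ih =>
      simp only [List.mem_cons, not_or] at hp
      have hc : c ≠ 'R' := fun h => hp.1 h.symm
      have hceq : (c == 'R') = false := by simp [hc]
      simp only [List.cons_append, lcaseLoop2, hceq, Bool.false_eq_true, if_false]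
      rw [ih (i + 1) hp.2]
      congr 1
      simp
      omega

-- ----- B's scan -----
theorem lcaseScan_sawL (l : List Char) (i : Nat) :
    (lcaseScan l i).1 = decide ('L' ∈ l) := by
  induction l generalizing i with
  | nil => simp [lcaseScan]
  | cons c rest ih =>
      by_cases hc : c = 'L'
      · simp [lcaseScan, hc]
      · have h1 : (c == 'L') = false := by simp [hc]
        have hmem : ('L' ∈ rest) ↔ ('L' ∈ c :: rest) := by
          simp only [List.mem_cons]
          exact ⟨Or.inr, fun h => h.rec (fun h' => absurd h'.symm hc) id⟩
        by_cases hr : c = 'R'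
        · have h2 : (c == 'R') = true := by simp [hr]
          simp only [lcaseScan, h1, h2, Bool.false_eq_true, if_false, if_true]
          rw [ih (i + 1), decide_eq_decide]
          exact hmem
        · have h2 : (c == 'R') = false := by simp [hr]
          simp only [lcaseScan, h1, h2, Bool.false_eq_true, if_false]
          rw [ih (i + 1), decide_eq_decide]
          exact hmem

theorem lcaseScan_fired_imp (l : List Char) (i : Nat) :
    (lcaseScan l i).2.1 = true → 'L' ∈ l := by
  induction l generalizing i with
  | nil => simp [lcaseScan]
  | cons c rest ih =>
      by_cases hc : c = 'L'
      · intro _; simp [hc]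
      · have h1 : (c == 'L') = false := by simp [hc]
        by_cases hr : c = 'R'
        · have h2 : (c == 'R') = true := by simp [hr]
          simp only [lcaseScan, h1, h2, Bool.false_eq_true, if_false, if_true]
          intro h
          rcases Bool.or_eq_true_iff.mp h with h' | h'
          · exact List.mem_cons_of_mem _ (ih (i + 1) h')
          · rw [lcaseScan_sawL] at h'
            exact List.mem_cons_of_mem _ (of_decide_eq_true h')
        · have h2 : (c == 'R') = false := by simp [hr]
          simp only [lcaseScan, h1, h2, Bool.false_eq_true, if_false]
          exact fun h => List.mem_cons_of_mem _ (ih (i + 1) h)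

-- a prefix without 'R' leaves fired and firstR unchanged
theorem lcaseScan_skip (p rest : List Char) (i : Nat) (hp : 'R' ∉ p) :
    (lcaseScan (p ++ rest) i).2 = (lcaseScan rest (i + p.length)).2 := by
  induction p generalizing i with
  | nil => simp
  | cons c q ih =>
      simp only [List.mem_cons, not_or] at hp
      have hr : c ≠ 'R' := fun h => hp.1 h.symm
      have hstep : (i + 1) + q.length = i + (c :: q).length := by simp; omega
      have h2 : (c == 'R') = false := by simp [hr]
      by_cases hc : c = 'L'
      · have h1 : (c == 'L') = true := by simp [hc]
        simp only [List.cons_append, lcaseScan, h1, if_true]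
        rw [← hstep, ← ih (i + 1) hp.2]
      · have h1 : (c == 'L') = false := by simp [hc]
        simp only [List.cons_append, lcaseScan, h1, h2, Bool.false_eq_true, if_false]
        rw [← hstep, ← ih (i + 1) hp.2]

-- the value of the scan right at the first 'R'
theorem lcaseScan_at_R (t : List Char) (i : Nat) :
    (lcaseScan ('R' :: t) i).2 = (decide ('L' ∈ t), (i : Int)) := by
  simp only [lcaseScan, if_neg (by decide : ¬ (('R' : Char) == 'L') = true),
    if_pos (by decide : (('R' : Char) == 'R') = true)]
  refine Prod.ext ?_ rfl
  simp only [lcaseScan_sawL]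
  by_cases h : 'L' ∈ t
  · simp [h]
  · simp only [h, decide_false, Bool.or_false]
    cases hf : (lcaseScan t (i + 1)).2.1
    · rfl
    · exact absurd (lcaseScan_fired_imp t (i + 1) hf) h

-- firstR stays -1 when there is no 'R'
theorem lcaseScan_noR (l : List Char) (i : Nat) (h : 'R' ∉ l) :
    (lcaseScan l i).2 = (false, -1) := by
  have := lcaseScan_skip l [] i h
  simpa [lcaseScan] using this

-- ===== VERDICT (by name: the statement is the Claim_ definition above) =====
theorem Lcase_spec : Claim_equal_Lcase := by
  intro value _
  unfold Spec_Lcase Lcase Lcase_alt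
  set l := value.toList with hl
  by_cases hR : 'R' ∈ l
  · have hIn : PySem.Str.isIn "R" value = true := by
      rw [PySem.Str.isIn_eq, PySem.Chars.isIn_iff_infix]
      exact (List.singleton_infix_iff 'R' value.toList).mpr hR
    obtain ⟨p, t, hpt, hnp⟩ := exists_firstR l hR
    have hA1 : lcaseLoop1 l false = decide ('L' ∈ t) := by
      rw [hpt, lcaseLoop1_skip _ _ hnp]
      simp only [lcaseLoop1]
      rw [if_neg (by decide), show (false || ('R' == 'R')) = true from rfl, lcaseLoop1_true]
    have hA2 : lcaseLoop2 l 0 = (p.length : Int) := by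
      rw [hpt, lcaseLoop2_skip _ _ _ hnp]
      simp [lcaseLoop2]
    have hB : (lcaseScan l 0).2 = (decide ('L' ∈ t), (p.length : Int)) := by
      rw [hpt, lcaseScan_skip _ _ _ hnp, lcaseScan_at_R]
      simp
    have hne : ¬((p.length : Int) = -1) := by omega
    rw [hIn, hA1, hA2, hB]
    by_cases hL : 'L' ∈ t <;> simp [hL, hne]
  · have hIn : PySem.Str.isIn "R" value = false := by
      rw [← Bool.not_eq_true, PySem.Str.isIn_eq, PySem.Chars.isIn_iff_infix]
      exact fun hc => hR ((List.singleton_infix_iff 'R' value.toList).mp hc)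
    have hB := lcaseScan_noR l 0 hR
    rw [hIn, hB]
    simp
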